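-- pv_equiv track=rewrite | github.com/ptgressman/COVIDanalysis | mldistr4.py | measure_state_duration
-- ===== SOURCE A (Python) =====
-- def measure_state_duration(datalist,bin):
--     started = False
--     start_index = -1
--     end_index = -1
--     durations = []
--     exceeded = False
--     for index,value in enumerate(datalist):
--         if value > bin[1]:
--             exceeded = True
--         if value >= bin[0] and value <= bin[1]:
--             if not started:
--                 started = True
--                 start_index = index
--         else:
--             if started:
--                 started = False
--                 duration = index - start_index
--                 durations.append(duration)
--         end_index = index
--     result = {}
--     if len(durations) == 0 and exceeded:
--         durations = [0]
--     result['complete'] = durations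
--     ongoing = []
--     if started:
--         ongoing = [end_index - start_index+1]
--     result['incomplete'] = ongoing
--     return result
-- ===== SOURCE B (Python) =====
-- def measure_state_duration(datalist, bin):
--     # Run-length encode the in-range flags, then read the answer off the groups.
--     flags = [bin[0] <= v <= bin[1] for v in datalist]
--     exceeded = any(v > bin[1] for v in datalist)
--     groups = []  # run-length encoding of flags: (flag, count)
--     for f in flags:
--         if groups and groups[-1][0] == f:
--             groups[-1] = (f, groups[-1][1] + 1)
--         else:
--             groups.append((f, 1))
--     lengths = [c for g, c in groups if g]
--     if groups and groups[-1][0]: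
--         *complete, last = lengths  # the last run is still ongoing
--         incomplete = [last]
--     else:
--         complete, incomplete = lengths, []
--     if not complete and exceeded:
--         complete = [0]
--     return {'complete': complete, 'incomplete': incomplete}
-- ===== Notes on version B (the rewrite author's own statement) =====
-- stated objective: alternative
-- what changed: A's single-pass five-variable state machine (started/start_index/end_index/durations/exceeded) is replaced by run-length-encoding the per-element in-range flags into groups and reading the complete durations, the ongoing trailing run and the exceeded fallback off that group list.
import Mathlib
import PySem

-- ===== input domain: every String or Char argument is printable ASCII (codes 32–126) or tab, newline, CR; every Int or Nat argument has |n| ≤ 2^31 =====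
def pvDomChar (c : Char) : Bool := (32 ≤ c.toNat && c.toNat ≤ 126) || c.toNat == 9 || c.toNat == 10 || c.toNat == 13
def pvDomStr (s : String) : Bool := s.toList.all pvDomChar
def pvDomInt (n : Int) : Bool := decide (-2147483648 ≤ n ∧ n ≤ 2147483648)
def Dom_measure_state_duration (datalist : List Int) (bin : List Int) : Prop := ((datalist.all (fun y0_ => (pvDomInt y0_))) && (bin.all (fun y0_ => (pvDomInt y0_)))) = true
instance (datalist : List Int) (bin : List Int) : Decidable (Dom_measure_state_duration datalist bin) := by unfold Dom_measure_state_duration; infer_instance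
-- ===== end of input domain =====

-- B replaces A's five-variable state machine by run-length-encoding the in-range flags and
-- reading the complete/ongoing durations off the groups (objective: alternative decomposition).

-- ===== PORT A =====
-- the for-loop of A, state = (started, start_index, end_index, durations, exceeded)
def msdLoop (lo hi : Int) : List (Int × Int) → Bool × Int × Int × List Int × Bool → Bool × Int × Int × List Int × Bool
  | [], s => s
  | (index, value) :: rest, (started, start_index, _end_index, durations, exceeded) =>
      let exceeded' := if hi < value then true else exceeded
      let t : Bool × Int × List Int :=
        if lo ≤ value ∧ value ≤ hi then
          (if started = false then (true, index, durations) else (started, start_index, durations))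
        else
          (if started = true then (false, start_index, durations ++ [index - start_index]) else (started, start_index, durations))
      msdLoop lo hi rest (t.1, t.2.1, index, t.2.2, exceeded')

-- result assembly at the end of A
def msdFinish (s : Bool × Int × Int × List Int × Bool) : List (String × List Int) :=
  [("complete", if s.2.2.2.1.length = 0 ∧ s.2.2.2.2 = true then [(0:Int)] else s.2.2.2.1),
   ("incomplete", if s.1 = true then [s.2.2.1 - s.2.1 + 1] else [])]

-- bin[0]/bin[1] are ported with pyGetD: Pre_ guarantees the indices are in range whenever the loop body runs
def measure_state_duration (datalist : List Int) (bin : List Int) : List (String × List Int) :=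
  msdFinish (msdLoop (PySem.List.pyGetD bin 0 0) (PySem.List.pyGetD bin 1 0)
    (PySem.List.enumerate datalist 0) (false, -1, -1, [], false))

-- ===== PORT B =====
-- one run-length-encoding step: bump the last group's count or open a new group
def rleStep (gs : List (Bool × Int)) (f : Bool) : List (Bool × Int) :=
  match gs.getLast? with
  | some (g, c) => if g = f then gs.dropLast ++ [(g, c + 1)] else gs ++ [(f, 1)]
  | none => gs ++ [(f, 1)]

-- result assembly at the end of B ('groups and groups[-1][0]' = getLast? is some (true, _);
-- lengths is nonempty there — its last run is the ongoing one — so getLastD's default is unreachable)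
def altFinish (groups : List (Bool × Int)) (exceeded : Bool) : List (String × List Int) :=
  let lengths := (groups.filter (fun g => g.1)).map (fun g => g.2)
  let p : List Int × List Int :=
    match groups.getLast? with
    | some (true, _) => (lengths.dropLast, [lengths.getLastD 0])
    | _ => (lengths, [])
  [("complete", if p.1 = [] ∧ exceeded = true then [(0:Int)] else p.1), ("incomplete", p.2)]

def measure_state_duration_alt (datalist : List Int) (bin : List Int) : List (String × List Int) :=
  altFinish
    (((datalist.map (fun v => decide (PySem.List.pyGetD bin 0 0 ≤ v ∧ v ≤ PySem.List.pyGetD bin 1 0))).foldl rleStep []))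
    (datalist.any (fun v => decide (PySem.List.pyGetD bin 1 0 < v)))

-- ===== PRECONDITION & SPEC =====
-- A raises IndexError on bin[1] as soon as the loop body runs with len(bin) < 2; Pre_ excludes exactly that.
def Pre_measure_state_duration (datalist : List Int) (bin : List Int) : Prop :=
  datalist = [] ∨ 2 ≤ bin.length
instance (datalist : List Int) (bin : List Int) : Decidable (Pre_measure_state_duration datalist bin) := by
  unfold Pre_measure_state_duration; infer_instance

def pvWitness_measure_state_duration : List Int × List Int := ([1, 5, 2], [0, 3])

def Spec_measure_state_duration (datalist : List Int) (bin : List Int) (out : List (String × List Int)) : Prop := out = measure_state_duration_alt datalist bin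
instance (datalist : List Int) (bin : List Int) (out : List (String × List Int)) : Decidable (Spec_measure_state_duration datalist bin out) := by unfold Spec_measure_state_duration; infer_instance

-- ===== CLAIM (what is proved, stated in full; the proofs are below) =====
def Claim_equal_measure_state_duration : Prop := ∀ (datalist : List Int) (bin : List Int), Dom_measure_state_duration datalist bin → Pre_measure_state_duration datalist bin → Spec_measure_state_duration datalist bin (measure_state_duration datalist bin)

-- ===== LEMMAS AND PROOFS =====

-- abstractions of B's group list used to state the loop invariant
def startedOf (gs : List (Bool × Int)) : Bool :=
  match gs.getLast? with
  | some (true, _) => true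
  | _ => false

def trailOf (gs : List (Bool × Int)) : Int :=
  match gs.getLast? with
  | some (true, c) => c
  | _ => 0

def completeOf (gs : List (Bool × Int)) : List Int :=
  if startedOf gs then ((gs.filter (fun g => g.1)).map (fun g => g.2)).dropLast
  else (gs.filter (fun g => g.1)).map (fun g => g.2)

lemma startedOf_concat (gs : List (Bool × Int)) (g : Bool) (c : Int) :
    startedOf (gs ++ [(g, c)]) = g := by
  cases g <;> simp [startedOf]

lemma trailOf_concat (gs : List (Bool × Int)) (g : Bool) (c : Int) :
    trailOf (gs ++ [(g, c)]) = if g then c else 0 := by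
  cases g <;> simp [trailOf]

lemma completeOf_concat_true (gs : List (Bool × Int)) (c : Int) :
    completeOf (gs ++ [(true, c)]) = (gs.filter (fun g => g.1)).map (fun g => g.2) := by
  simp [completeOf, startedOf_concat, List.filter_append, List.map_append]

lemma completeOf_concat_false (gs : List (Bool × Int)) (c : Int) :
    completeOf (gs ++ [(false, c)]) = (gs.filter (fun g => g.1)).map (fun g => g.2) := by
  simp [completeOf, startedOf_concat, List.filter_append]

lemma completeOf_of_not_started (gs : List (Bool × Int)) (h : startedOf gs = false) :
    completeOf gs = (gs.filter (fun g => g.1)).map (fun g => g.2) := by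
  simp [completeOf, h]

lemma filterMap_of_started (gs : List (Bool × Int)) (c : Int)
    (h : gs.getLast? = some (true, c)) :
    (gs.filter (fun g => g.1)).map (fun g => g.2) = completeOf gs ++ [c] := by
  have hgs : gs.dropLast ++ [((true : Bool), c)] = gs := List.dropLast_append_getLast? _ h
  have hst : startedOf gs = true := by simp [startedOf, h]
  rw [completeOf, if_pos hst]
  conv_lhs => rw [← hgs]
  rw [← hgs]
  simp [List.filter_append, List.map_append]

lemma rleStep_of_not_started_true (gs : List (Bool × Int)) (h : startedOf gs = false) :
    rleStep gs true = gs ++ [(true, 1)] := by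
  unfold rleStep
  cases hg : gs.getLast? with
  | none => rfl
  | some a =>
    obtain ⟨g, c⟩ := a
    cases g
    · simp
    · simp [startedOf, hg] at h

lemma startedOf_eq_true_iff (gs : List (Bool × Int)) :
    startedOf gs = true ↔ ∃ c, gs.getLast? = some (true, c) := by
  unfold startedOf
  cases hg : gs.getLast? with
  | none => simp
  | some a =>
    obtain ⟨g, c⟩ := a
    cases g <;> simp

lemma exceeded_fold (hi : Int) (xs : List Int) (ex : Bool) :
    xs.foldl (fun e v => if hi < v then true else e) ex
      = (ex || xs.any (fun v => decide (hi < v))) := by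
  induction xs generalizing ex with
  | nil => simp
  | cons v rest ih =>
    rw [List.foldl_cons, ih]
    by_cases h : hi < v <;> simp [h]

-- Loop invariant: A's state after processing xs (indices from i) is the image of B's group list.
lemma loop_inv (lo hi : Int) (xs : List Int) : ∀ (i si : Int) (gs : List (Bool × Int)) (ex : Bool),
    (startedOf gs = true → si = i - trailOf gs) →
    ∃ si',
      msdLoop lo hi (PySem.List.enumerate xs i) (startedOf gs, si, i - 1, completeOf gs, ex)
        = (startedOf (xs.foldl (fun a v => rleStep a (decide (lo ≤ v ∧ v ≤ hi))) gs), si',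
           i + xs.length - 1,
           completeOf (xs.foldl (fun a v => rleStep a (decide (lo ≤ v ∧ v ≤ hi))) gs),
           xs.foldl (fun e v => if hi < v then true else e) ex)
      ∧ (startedOf (xs.foldl (fun a v => rleStep a (decide (lo ≤ v ∧ v ≤ hi))) gs) = true →
          si' = (i + xs.length) - trailOf (xs.foldl (fun a v => rleStep a (decide (lo ≤ v ∧ v ≤ hi))) gs)) := by
  induction xs with
  | nil =>
    intro i si gs ex hsi
    refine ⟨si, ?_, ?_⟩
    · simp [PySem.List.enumerate_nil, msdLoop]
    · simpa using hsi
  | cons v rest ih =>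
    intro i si gs ex hsi
    rw [PySem.List.enumerate_cons, msdLoop]
    simp only [List.foldl_cons, List.length_cons]
    by_cases hv : lo ≤ v ∧ v ≤ hi
    · by_cases hb : startedOf gs = true
      · -- in range, run continues
        obtain ⟨c, hlast⟩ := (startedOf_eq_true_iff gs).mp hb
        have hgs : gs.dropLast ++ [((true : Bool), c)] = gs := List.dropLast_append_getLast? _ hlast
        have hstep : rleStep gs (decide (lo ≤ v ∧ v ≤ hi)) = gs.dropLast ++ [(true, c + 1)] := by
          simp [rleStep, hlast, hv]
        have hco : completeOf (gs.dropLast ++ [(true, c + 1)]) = completeOf gs := by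
          rw [completeOf_concat_true]
          conv_rhs => rw [completeOf, if_pos hb, ← hgs]
          simp [List.filter_append]
        obtain ⟨si', h1, h2⟩ := ih (i + 1) si (gs.dropLast ++ [(true, c + 1)])
          (if hi < v then true else ex) (by
            intro _
            rw [trailOf_concat, if_pos rfl, hsi hb]
            simp only [trailOf, hlast]
            ring)
        rw [hco] at h1
        rw [hstep]
        refine ⟨si', ?_, ?_⟩
        · simp only [hv, hb, and_self, if_true, Bool.true_eq_false, if_false]
          push_cast
          rw [show (i + (((rest.length:Int)) + 1) - 1) = ((i+1) + (rest.length:Int) - 1) from by ring]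
          convert h1 using 3
          · rw [startedOf_concat]
          · norm_num
        · intro h
          rw [h2 h]
          push_cast
          ring
      · -- in range, run opens
        have hb' : startedOf gs = false := by simpa using hb
        have hstep : rleStep gs (decide (lo ≤ v ∧ v ≤ hi)) = gs ++ [(true, 1)] := by
          simpa [hv] using rleStep_of_not_started_true gs hb'
        have hco : completeOf (gs ++ [(true, 1)]) = completeOf gs := by
          rw [completeOf_concat_true, completeOf_of_not_started gs hb']
        obtain ⟨si', h1, h2⟩ := ih (i + 1) i (gs ++ [(true, 1)])
          (if hi < v then true else ex) (by
            intro _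
            rw [trailOf_concat, if_pos rfl]
            ring)
        rw [hco] at h1
        rw [hstep]
        refine ⟨si', ?_, ?_⟩
        · simp only [hv, hb', and_self, if_true]
          push_cast
          rw [show (i + (((rest.length:Int)) + 1) - 1) = ((i+1) + (rest.length:Int) - 1) from by ring]
          convert h1 using 3
          · rw [startedOf_concat]
          · norm_num
        · intro h
          rw [h2 h]
          push_cast
          ring
    · by_cases hb : startedOf gs = true
      · -- out of range, run closes
        obtain ⟨c, hlast⟩ := (startedOf_eq_true_iff gs).mp hb
        have hstep : rleStep gs (decide (lo ≤ v ∧ v ≤ hi)) = gs ++ [(false, 1)] := by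
          simp [rleStep, hlast, hv]
        have hdur : i - si = c := by
          rw [hsi hb]
          simp only [trailOf, hlast]
          ring
        have hco : completeOf (gs ++ [(false, 1)]) = completeOf gs ++ [i - si] := by
          rw [completeOf_concat_false, filterMap_of_started gs c hlast, hdur]
        obtain ⟨si', h1, h2⟩ := ih (i + 1) si (gs ++ [(false, 1)])
          (if hi < v then true else ex) (by
            intro h
            rw [startedOf_concat] at h
            simp at h)
        rw [hco] at h1
        rw [hstep]
        refine ⟨si', ?_, ?_⟩
        · simp only [hv, if_false, hb, if_true]
          push_cast
          rw [show (i + (((rest.length:Int)) + 1) - 1) = ((i+1) + (rest.length:Int) - 1) from by ring]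
          convert h1 using 3
          · rw [startedOf_concat]
          · norm_num
        · intro h
          rw [h2 h]
          push_cast
          ring
      · -- out of range, still outside a run
        have hb' : startedOf gs = false := by simpa using hb
        obtain ⟨gs₂, hstep, hs2, hc2⟩ :
            ∃ gs₂, rleStep gs (decide (lo ≤ v ∧ v ≤ hi)) = gs₂ ∧
              startedOf gs₂ = false ∧ completeOf gs₂ = completeOf gs := by
          unfold rleStep
          cases hg : gs.getLast? with
          | none =>
            refine ⟨gs ++ [(false, 1)], by simp [hv], ?_, ?_⟩
            · rw [startedOf_concat]
            · rw [completeOf_concat_false, completeOf_of_not_started gs hb']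
          | some a =>
            obtain ⟨g, cc⟩ := a
            cases g
            · have hgs : gs.dropLast ++ [((false : Bool), cc)] = gs := List.dropLast_append_getLast? _ hg
              refine ⟨gs.dropLast ++ [(false, cc + 1)], by simp [hv], ?_, ?_⟩
              · rw [startedOf_concat]
              · rw [completeOf_concat_false, completeOf_of_not_started gs hb']
                conv_rhs => rw [← hgs]
                simp [List.filter_append]
            · simp [startedOf, hg] at hb'
        obtain ⟨si', h1, h2⟩ := ih (i + 1) si gs₂
          (if hi < v then true else ex) (by
            intro h
            rw [hs2] at h
            simp at h)
        rw [hs2, hc2] at h1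
        rw [hstep]
        refine ⟨si', ?_, ?_⟩
        · simp only [hv, if_false, hb', Bool.false_eq_true, if_true, if_false]
          push_cast
          rw [show (i + (((rest.length:Int)) + 1) - 1) = ((i+1) + (rest.length:Int) - 1) from by ring]
          convert h1 using 3
          norm_num
        · intro h
          rw [h2 h]
          push_cast
          ring

lemma ports_eq (datalist bin : List Int) :
    measure_state_duration datalist bin = measure_state_duration_alt datalist bin := by
  unfold measure_state_duration measure_state_duration_alt
  rw [List.foldl_map]
  obtain ⟨si', h1, h2⟩ := loop_inv (PySem.List.pyGetD bin 0 0) (PySem.List.pyGetD bin 1 0)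
    datalist 0 (-1) [] false (by intro h; simp [startedOf] at h)
  have h0 : ((false : Bool), (-1:Int), (-1:Int), ([]:List Int), false)
      = (startedOf [], (-1:Int), (0:Int) - 1, completeOf [], false) := by
    norm_num [startedOf, completeOf]
  rw [h0, h1]
  set G := datalist.foldl
    (fun a v => rleStep a (decide (PySem.List.pyGetD bin 0 0 ≤ v ∧ v ≤ PySem.List.pyGetD bin 1 0))) []
    with hG
  rw [exceeded_fold, Bool.false_or]
  by_cases hs : startedOf G = true
  · obtain ⟨c, hlast⟩ := (startedOf_eq_true_iff G).mp hs
    have hlen : (G.filter (fun g => g.1)).map (fun g => g.2) = completeOf G ++ [c] :=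
      filterMap_of_started G c hlast
    have hinc : (0 : Int) + datalist.length - 1 - si' + 1 = c := by
      rw [h2 hs]
      simp only [trailOf, hlast]
      ring
    simp only [msdFinish, altFinish, hlast, hlen, hs, if_true, List.dropLast_concat,
      List.getLastD_concat, hinc, List.length_eq_zero_iff]
  · have hs' : startedOf G = false := by simpa using hs
    have hlen : (G.filter (fun g => g.1)).map (fun g => g.2) = completeOf G :=
      (completeOf_of_not_started G hs').symm
    simp only [msdFinish, altFinish, hlen, hs', Bool.false_eq_true, if_false,
      List.length_eq_zero_iff]
    cases hg : G.getLast? with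
    | none => simp
    | some a =>
      obtain ⟨g, cc⟩ := a
      cases g
      · simp
      · simp [startedOf, hg] at hs'

-- ===== VERDICT (by name: the statement is the Claim_ definition above) =====
theorem measure_state_duration_spec : Claim_equal_measure_state_duration := by
  intro datalist bin _ _
  unfold Spec_measure_state_duration
  exact ports_eq datalist bin
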